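-- pv_equiv track=rewrite | github.com/ericc59/aria | aria/core/output_size.py | _count_interval_clusters
-- ===== SOURCE A (Python) =====
-- def _count_interval_clusters(intervals: object) -> int:
--     ordered = sorted(intervals)
--     if not ordered:
--         return 0
--     clusters = 1
--     current_end = ordered[0][1]
--     for start, end in ordered[1:]:
--         if start <= current_end:
--             if end > current_end:
--                 current_end = end
--             continue
--         clusters += 1
--         current_end = end
--     return clusters
-- ===== SOURCE B (Python) =====
-- def _count_interval_clusters(intervals: object) -> int:
--     ordered = sorted(intervals)
--     if not ordered:
--         return 0
--
--     def solve(seg, bound):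
--         # returns (clusters opened in seg given max end `bound` seen to its left,
--         #          max end within seg); a cluster opens at an interval iff its
--         # start exceeds the prefix-maximum of all ends before it, and prefix
--         # maxima compose across the midpoint split.
--         if len(seg) == 1:
--             s, e = seg[0]
--             return ((0 if bound is not None and s <= bound else 1), e)
--         mid = len(seg) // 2
--         cl, ml = solve(seg[:mid], bound)
--         cr, mr = solve(seg[mid:], ml if bound is None else max(bound, ml))
--         return (cl + cr, max(ml, mr))
--
--     return solve(ordered, None)[0]
-- ===== Notes on version B (the rewrite author's own statement) =====
-- stated objective: alternative
-- what changed: Replaces A's sequential left-to-right merge state machine by a divide-and-conquer: each half of the sorted list is solved recursively, returning (clusters, max end), and the left half's max end is passed as a bound into the right half; correct because a cluster opens exactly where a start exceeds the prefix maximum of ends, and prefix maxima compose across the split.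
import Mathlib
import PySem

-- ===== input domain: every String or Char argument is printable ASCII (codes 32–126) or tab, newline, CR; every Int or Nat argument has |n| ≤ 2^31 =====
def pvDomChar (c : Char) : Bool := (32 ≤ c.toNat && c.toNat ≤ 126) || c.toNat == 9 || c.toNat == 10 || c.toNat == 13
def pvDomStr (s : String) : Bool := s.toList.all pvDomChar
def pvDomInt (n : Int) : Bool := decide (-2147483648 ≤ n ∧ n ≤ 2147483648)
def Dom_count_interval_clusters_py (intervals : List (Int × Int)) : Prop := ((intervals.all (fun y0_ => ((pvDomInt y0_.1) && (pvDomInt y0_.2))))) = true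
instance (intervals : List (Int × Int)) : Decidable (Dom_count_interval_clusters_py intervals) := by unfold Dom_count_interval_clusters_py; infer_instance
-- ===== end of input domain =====

-- B replaces A's sequential state machine by a divide-and-conquer over the sorted list:
-- each half reports (clusters, max end) and the left max is passed as a bound into the
-- right half (objective: alternative decomposition, same O(n log n) cost).


-- ===== PORT A =====
-- sorted(intervals) on pairs: Python's lexicographic tuple order = sorted2 with keys fst, snd
def count_interval_clusters_py (intervals : List (Int × Int)) : Int :=
  let ordered := PySem.List.sorted2 intervals Prod.fst Prod.snd
  match ordered with
  | [] => 0
  | first :: rest =>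
    -- clusters = 1; current_end = ordered[0][1]; for start, end in ordered[1:]: …
    let st := rest.foldl (fun (st : Int × Int) (p : Int × Int) =>
      if p.1 ≤ st.2 then
        (if p.2 > st.2 then (st.1, p.2) else st)
      else (st.1 + 1, p.2)) (1, first.2)
    st.1

-- ===== PORT B =====
-- solve(seg, bound) of Source B: (clusters opened in seg given max end `bound` to its left,
-- max end within seg); recursion on the two halves of the segment
def pvSolve : List (Int × Int) → Option Int → Int × Int
  | [], _ => (0, 0)          -- unreachable: solve is only called on nonempty segments
  | [p], b => ((match b with | none => 1 | some m => if p.1 ≤ m then 0 else 1), p.2)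
  | p :: q :: rest, b =>
    let seg := p :: q :: rest
    let mid := seg.length / 2
    let lr := pvSolve (seg.take mid) b
    let rr := pvSolve (seg.drop mid) (some (match b with | none => lr.2 | some x => max x lr.2))
    (lr.1 + rr.1, max lr.2 rr.2)
termination_by xs _ => xs.length
decreasing_by
  · simp [List.length_take]; omega
  · simp [List.length_drop]; omega

def count_interval_clusters_py_alt (intervals : List (Int × Int)) : Int :=
  match PySem.List.sorted2 intervals Prod.fst Prod.snd with
  | [] => 0
  | ordered => (pvSolve ordered none).1

-- ===== PRECONDITION & SPEC =====
def Spec_count_interval_clusters_py (intervals : List (Int × Int)) (out : Int) : Prop := out = count_interval_clusters_py_alt intervals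
instance (intervals : List (Int × Int)) (out : Int) : Decidable (Spec_count_interval_clusters_py intervals out) := by unfold Spec_count_interval_clusters_py; infer_instance

-- ===== CLAIM (what is proved, stated in full; the proofs are below) =====
def Claim_equal_count_interval_clusters_py : Prop := ∀ (intervals : List (Int × Int)), Dom_count_interval_clusters_py intervals → Spec_count_interval_clusters_py intervals (count_interval_clusters_py intervals)

-- ===== LEMMAS AND PROOFS =====

-- the comparison sorted2 inserts by
def pvLexLt (a b : Int × Int) : Bool := decide (a.1 < b.1) || (!decide (b.1 < a.1) && decide (a.2 < b.2))

theorem pvLexLt_fst_le {a b : Int × Int} (h : pvLexLt a b = true) : a.1 ≤ b.1 := by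
  simp [pvLexLt] at h; omega

theorem pvLexLt_fst_ge {a b : Int × Int} (h : pvLexLt a b = false) : b.1 ≤ a.1 := by
  simp [pvLexLt] at h; omega

theorem insertBy_pairwise_fst (x : Int × Int) (ys : List (Int × Int))
    (h : ys.Pairwise (fun a b => a.1 ≤ b.1)) :
    (PySem.List.insertBy pvLexLt x ys).Pairwise (fun a b => a.1 ≤ b.1) := by
  induction ys with
  | nil => simp [PySem.List.insertBy]
  | cons y ys ih =>
    rw [List.pairwise_cons] at h
    by_cases hb : pvLexLt x y = true
    · simp only [PySem.List.insertBy, hb, if_pos]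
      refine List.Pairwise.cons ?_ (List.Pairwise.cons h.1 h.2)
      intro z hz
      rcases List.mem_cons.mp hz with rfl | hz
      · exact pvLexLt_fst_le hb
      · exact le_trans (pvLexLt_fst_le hb) (h.1 z hz)
    · simp only [PySem.List.insertBy, hb, if_neg, Bool.not_eq_true]
      refine List.Pairwise.cons ?_ (ih h.2)
      intro z hz
      rcases (PySem.List.mem_insertBy pvLexLt x z ys).mp hz with rfl | hz
      · exact pvLexLt_fst_ge (Bool.not_eq_true _ ▸ hb)
      · exact h.1 z hz

theorem foldl_insertBy_pairwise_fst (xs acc : List (Int × Int))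
    (h : acc.Pairwise (fun a b => a.1 ≤ b.1)) :
    (List.foldl (fun acc x => PySem.List.insertBy pvLexLt x acc) acc xs).Pairwise
      (fun a b => a.1 ≤ b.1) := by
  induction xs generalizing acc with
  | nil => exact h
  | cons x xs ih => exact ih _ (insertBy_pairwise_fst x acc h)

theorem sorted2_pairwise_fst (xs : List (Int × Int)) :
    (PySem.List.sorted2 xs Prod.fst Prod.snd).Pairwise (fun a b => a.1 ≤ b.1) := by
  show (List.foldl (fun acc x => PySem.List.insertBy pvLexLt x acc) [] xs).Pairwise _
  exact foldl_insertBy_pairwise_fst xs [] (by simp)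

-- proof-side reference fold: running (clusters, max end so far) pass
def pvStep (st : Int × Option Int) (p : Int × Int) : Int × Option Int :=
  match st.2 with
  | none => (st.1 + 1, some p.2)
  | some m => ((if p.1 > m then st.1 + 1 else st.1), some (max m p.2))

def pvMergeB (b : Option Int) (m : Int) : Int :=
  match b with | none => m | some x => max x m

-- loop invariant: A's state (c, ce) and the reference state (c, some M) stay in step when
-- ce ≤ M and every remaining start that beats ce also beats M
theorem loop_eq (t : List (Int × Int)) : ∀ (c ce M : Int), ce ≤ M →
    (∀ p ∈ t, p.1 > ce → p.1 > M) →
    t.Pairwise (fun a b => a.1 ≤ b.1) →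
    (t.foldl (fun (st : Int × Int) (p : Int × Int) =>
        if p.1 ≤ st.2 then
          (if p.2 > st.2 then (st.1, p.2) else st)
        else (st.1 + 1, p.2)) (c, ce)).1
    = (t.foldl pvStep (c, some M)).1 := by
  induction t with
  | nil => intro c ce M _ _ _; rfl
  | cons p t ih =>
    intro c ce M hle hbeat hpw
    rw [List.pairwise_cons] at hpw
    simp only [List.foldl_cons, pvStep]
    by_cases hs : p.1 ≤ ce
    · have hsM : p.1 ≤ M := le_trans hs hle
      have hB : ¬ p.1 > M := by omega
      by_cases he : p.2 > ce
      · simp only [if_pos hs, if_pos he, if_neg hB]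
        apply ih c p.2 (max M p.2) (le_max_right _ _) ?_ hpw.2
        intro q hq hq2
        have h1 : q.1 > ce := by omega
        have h2 := hbeat q (List.mem_cons_of_mem _ hq) h1
        exact max_lt h2 hq2
      · simp only [if_pos hs, if_neg he, if_neg hB]
        have hmax : max M p.2 = M := max_eq_left (by omega)
        rw [hmax]
        exact ih c ce M hle (fun q hq => hbeat q (List.mem_cons_of_mem _ hq)) hpw.2
    · have hsM : p.1 > M := hbeat p List.mem_cons_self (by omega)
      simp only [if_neg hs, if_pos (show p.1 > M from hsM)]
      apply ih (c+1) p.2 (max M p.2) (le_max_right _ _) ?_ hpw.2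
      intro q hq hq2
      have hqp : p.1 ≤ q.1 := hpw.1 q hq
      exact max_lt (by omega) hq2

-- max of the ends of a segment (0 for the empty segment, never used there)
def pvE : List (Int × Int) → Int
  | [] => 0
  | p :: t => t.foldl (fun m q => max m q.2) p.2

theorem foldl_max_shift (t : List (Int × Int)) (a : Int) : ∀ (b : Int),
    t.foldl (fun m q => max m q.2) (max a b) = max a (t.foldl (fun m q => max m q.2) b) := by
  induction t with
  | nil => intro b; rfl
  | cons q t ih =>
    intro b
    simp only [List.foldl_cons, max_assoc]
    exact ih (max b q.2)

theorem pvE_append (l r : List (Int × Int)) (hl : l ≠ []) (hr : r ≠ []) :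
    pvE (l ++ r) = max (pvE l) (pvE r) := by
  obtain ⟨p, t, rfl⟩ := List.exists_cons_of_ne_nil hl
  obtain ⟨h, r', rfl⟩ := List.exists_cons_of_ne_nil hr
  simp only [pvE, List.cons_append, List.foldl_append, List.foldl_cons]
  exact foldl_max_shift r' _ _

-- fold characterisation: a nonempty fold from (c, b) returns c + count from (0, b),
-- and its max component is b merged with the segment's max end
theorem fold_cons_char (t : List (Int × Int)) : ∀ (p : Int × Int) (c : Int) (b : Option Int),
    List.foldl pvStep (c, b) (p :: t)
    = (c + (List.foldl pvStep (0, b) (p :: t)).1, some (pvMergeB b (pvE (p :: t)))) := by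
  induction t with
  | nil =>
    intro p c b
    cases b <;> simp [pvStep, pvMergeB, pvE] <;> split_ifs <;> simp
  | cons q t ih =>
    intro p c b
    conv_lhs => rw [List.foldl_cons]
    conv_rhs => rw [List.foldl_cons]
    cases b with
    | none =>
      simp only [pvStep]
      rw [ih q (c + 1) (some p.2), ih q (0 + 1) (some p.2)]
      refine Prod.ext ?_ ?_
      · simp only
        ring
      · simp [pvMergeB, pvE, List.foldl_cons, foldl_max_shift]
    | some m =>
      simp only [pvStep]
      by_cases hp : p.1 > m
      · simp only [if_pos hp, zero_add]
        rw [ih q (c + 1) (some (max m p.2)), ih q 1 (some (max m p.2))]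
        refine Prod.ext ?_ ?_
        · simp only
          ring
        · simp [pvMergeB, pvE, List.foldl_cons, foldl_max_shift, max_assoc]
      · simp only [if_neg hp]
        rw [ih q c (some (max m p.2)), ih q 0 (some (max m p.2))]
        refine Prod.ext ?_ ?_
        · simp
        · simp [pvMergeB, pvE, List.foldl_cons, foldl_max_shift, max_assoc]

-- the divide-and-conquer agrees with the reference fold (strong induction on length)
theorem pvSolve_eq_fold_aux : ∀ (n : Nat) (xs : List (Int × Int)) (b : Option Int),
    xs.length ≤ n → pvSolve xs b = ((List.foldl pvStep (0, b) xs).1, pvE xs) := by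
  intro n
  induction n with
  | zero =>
    intro xs b h
    rw [List.length_eq_zero_iff.mp (Nat.le_zero.mp h)]
    rw [pvSolve.eq_def]; rfl
  | succ n ih =>
    intro xs b h
    match xs with
    | [] => rw [pvSolve.eq_def]; rfl
    | [p] =>
      rw [pvSolve.eq_def]
      cases b <;> simp [pvStep, pvE] <;> split_ifs <;> simp <;> omega
    | p :: q :: rest =>
      have hlen : (p :: q :: rest).length = rest.length + 2 := by simp
      have hm1 : 1 ≤ (p :: q :: rest).length / 2 := by omega
      have hm2 : (p :: q :: rest).length / 2 < (p :: q :: rest).length := by omega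
      have hunf : pvSolve (p :: q :: rest) b
          = ((pvSolve ((p :: q :: rest).take ((p :: q :: rest).length / 2)) b).1
              + (pvSolve ((p :: q :: rest).drop ((p :: q :: rest).length / 2))
                  (some (pvMergeB b (pvSolve ((p :: q :: rest).take ((p :: q :: rest).length / 2)) b).2))).1,
             max (pvSolve ((p :: q :: rest).take ((p :: q :: rest).length / 2)) b).2
                 (pvSolve ((p :: q :: rest).drop ((p :: q :: rest).length / 2))
                  (some (pvMergeB b (pvSolve ((p :: q :: rest).take ((p :: q :: rest).length / 2)) b).2))).2) := by
        rw [pvSolve.eq_def]; rfl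
      generalize hmid : (p :: q :: rest).length / 2 = mid at hunf hm1 hm2
      generalize hLdef : (p :: q :: rest : List (Int × Int)) = L at hunf hlen hm2
      have htl : (L.take mid).length = mid := by
        rw [List.length_take]; omega
      have hdl : (L.drop mid).length = L.length - mid := by
        rw [List.length_drop]
      have hLn : L.length ≤ n + 1 := by rw [← hLdef]; exact h
      have ihl := ih (L.take mid) b (by omega)
      have ihr := ih (L.drop mid) (some (pvMergeB b (pvSolve (L.take mid) b).2)) (by omega)
      have hlne : L.take mid ≠ [] := by
        intro hx; have := congrArg List.length hx; rw [htl] at this; simp at this; omega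
      have hrne : L.drop mid ≠ [] := by
        intro hx; have := congrArg List.length hx; rw [hdl] at this; simp at this; omega
      obtain ⟨p1, t1, h1⟩ := List.exists_cons_of_ne_nil hlne
      obtain ⟨p2, t2, h2⟩ := List.exists_cons_of_ne_nil hrne
      have hsplit : L = L.take mid ++ L.drop mid := (List.take_append_drop mid L).symm
      -- characterise the half folds
      have hfl : List.foldl pvStep (0, b) (L.take mid)
          = ((List.foldl pvStep (0, b) (L.take mid)).1, some (pvMergeB b (pvE (L.take mid)))) := by
        conv_lhs => rw [h1, fold_cons_char]
        rw [← h1]; simp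
      have hfold : (List.foldl pvStep (0, b) L).1
          = (List.foldl pvStep (0, b) (L.take mid)).1
            + (List.foldl pvStep (0, some (pvMergeB b (pvE (L.take mid)))) (L.drop mid)).1 := by
        conv_lhs => rw [hsplit, List.foldl_append, hfl, h2, fold_cons_char]
        rw [← h2]
      have hE : pvE L = max (pvE (L.take mid)) (pvE (L.drop mid)) := by
        conv_lhs => rw [hsplit]
        exact pvE_append _ _ hlne hrne
      rw [hunf, ihr, ihl, hfold, hE]

theorem pvSolve_eq_fold (xs : List (Int × Int)) (b : Option Int) :
    pvSolve xs b = ((List.foldl pvStep (0, b) xs).1, pvE xs) :=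
  pvSolve_eq_fold_aux xs.length xs b le_rfl

-- ===== VERDICT (by name: the statement is the Claim_ definition above) =====
theorem count_interval_clusters_py_spec : Claim_equal_count_interval_clusters_py := by
  intro intervals _
  unfold Spec_count_interval_clusters_py count_interval_clusters_py count_interval_clusters_py_alt
  have hpw := sorted2_pairwise_fst intervals
  cases hL : PySem.List.sorted2 intervals Prod.fst Prod.snd with
  | nil => simp
  | cons first rest =>
    rw [hL] at hpw
    rw [List.pairwise_cons] at hpw
    simp only [List.foldl_cons]
    rw [loop_eq rest 1 first.2 first.2 le_rfl (fun p _ h => h) hpw.2]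
    rw [pvSolve_eq_fold, List.foldl_cons]
    rfl
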